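-- pv_equiv track=rewrite | github.com/epoyraz/leetcode | solutions/2592.py | minimumTotalCost
-- ===== SOURCE A (Python) =====
-- def minimumTotalCost(nums1, nums2):
--     n = len(nums1)
--     bad = []
--     freq = {}
--     for i in range(n):
--         if nums1[i] == nums2[i]:
--             bad.append(i)
--             freq[nums1[i]] = freq.get(nums1[i], 0) + 1
--
--     if not bad:
--         return 0
--
--     majority_val = max(freq, key=freq.get)
--     majority_cnt = freq[majority_val]
--     need = max(0, 2 * majority_cnt - len(bad))
--
--     extra = []
--     if need:
--         for i in range(n):
--             if nums1[i] != nums2[i] and nums1[i] != majority_val and nums2[i] != majority_val: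
--                 extra.append(i)
--                 if len(extra) == need:
--                     break
--         if len(extra) < need:
--             return -1
--
--     return sum(bad) + sum(extra)
-- ===== SOURCE B (Python) =====
-- def minimumTotalCost(nums1, nums2):
--     pairs = list(zip(nums1, nums2))
--     bad = [i for i, (a, b) in enumerate(pairs) if a == b]
--     if not bad:
--         return 0
--     vals = [a for a, b in pairs if a == b]
--     cand, cnt = 0, 0
--     for v in vals:
--         if cnt == 0:
--             cand = v
--         cnt += 1 if v == cand else -1
--     need = max(0, 2 * vals.count(cand) - len(bad))
--     extra = [i for i, (a, b) in enumerate(pairs)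
--              if a != b and a != cand and b != cand][:need]
--     if len(extra) < need:
--         return -1
--     return sum(bad) + sum(extra)
-- ===== Notes on version B (the rewrite author's own statement) =====
-- stated objective: alternative
-- what changed: A's index loop with a frequency dictionary and max(freq, key=freq.get) is replaced by filtered zip/enumerate comprehensions, Boyer-Moore majority voting over the colliding values followed by one verification count, and a filtered comprehension sliced to the first `need` entries instead of A's early-exit greedy loop.
import Mathlib
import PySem

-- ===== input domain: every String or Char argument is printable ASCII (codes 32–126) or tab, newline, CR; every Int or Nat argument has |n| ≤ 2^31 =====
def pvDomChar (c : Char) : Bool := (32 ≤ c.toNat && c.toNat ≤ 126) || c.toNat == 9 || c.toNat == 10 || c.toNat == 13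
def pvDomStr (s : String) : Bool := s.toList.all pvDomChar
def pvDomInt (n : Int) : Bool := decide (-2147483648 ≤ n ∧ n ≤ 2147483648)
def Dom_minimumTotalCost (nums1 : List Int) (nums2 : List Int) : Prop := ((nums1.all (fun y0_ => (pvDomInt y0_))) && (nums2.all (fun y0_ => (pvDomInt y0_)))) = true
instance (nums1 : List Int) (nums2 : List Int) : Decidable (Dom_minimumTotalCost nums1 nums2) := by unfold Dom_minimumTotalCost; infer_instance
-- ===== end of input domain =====

-- B recasts the whole function in comprehension style: bad indices and colliding values come
-- from filtered zip/enumerate comprehensions, the majority value is found by Boyer-Moore voting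
-- over the colliding values (no frequency dictionary), and the extra indices are a filtered
-- comprehension sliced to the first `need` entries instead of an early-exit index loop.

-- ===== PORT A =====
-- A's 'for i in range(n): ... append ... if len(extra) == need: break' loop
def pvExtraLoop (nums1 nums2 : List Int) (mv need : Int) : List Int → List Int → List Int
  | [], extra => extra
  | i :: rest, extra =>
    if PySem.List.pyGetD nums1 i 0 ≠ PySem.List.pyGetD nums2 i 0 ∧
       PySem.List.pyGetD nums1 i 0 ≠ mv ∧ PySem.List.pyGetD nums2 i 0 ≠ mv then
      let extra' := extra ++ [i]
      if (extra'.length : Int) = need then extra'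
      else pvExtraLoop nums1 nums2 mv need rest extra'
    else pvExtraLoop nums1 nums2 mv need rest extra

def minimumTotalCost (nums1 : List Int) (nums2 : List Int) : Int :=
  let n : Int := nums1.length
  let st := (PySem.List.pyRange 0 n 1).foldl
      (fun (acc : List Int × PySem.Dict Int Int) i =>
        if PySem.List.pyGetD nums1 i 0 = PySem.List.pyGetD nums2 i 0 then
          (acc.1 ++ [i], acc.2.modify (PySem.List.pyGetD nums1 i 0) 0 (· + 1))
        else acc)
      ([], PySem.Dict.empty)
  let bad := st.1
  let freq := st.2
  if bad = [] then 0
  else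
    match PySem.List.max? freq.keys (fun k => freq.getD k 0) with
    | none => 0  -- unreachable: freq is nonempty whenever bad is nonempty (Python would raise on an empty dict)
    | some majorityVal =>
      let majorityCnt := freq.getD majorityVal 0
      let need := max 0 (2 * majorityCnt - (bad.length : Int))
      if need ≠ 0 then
        let extra := pvExtraLoop nums1 nums2 majorityVal need (PySem.List.pyRange 0 n 1) []
        if (extra.length : Int) < need then -1
        else bad.sum + extra.sum
      else bad.sum + ([] : List Int).sum

-- ===== PORT B =====
-- Boyer-Moore voting step: (cand, cnt) updated by one value v
def pvBMStep (s : Int × Int) (v : Int) : Int × Int :=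
  if s.2 = 0 then (v, 1)
  else if v = s.1 then (s.1, s.2 + 1)
  else (s.1, s.2 - 1)

def minimumTotalCost_alt (nums1 : List Int) (nums2 : List Int) : Int :=
  let pairs := nums1.zip nums2
  let bad := ((PySem.List.enumerate pairs).filter (fun p => p.2.1 == p.2.2)).map (fun p => p.1)
  if bad = [] then 0
  else
    let vals := (pairs.filter (fun p => p.1 == p.2)).map (fun p => p.1)
    let cand := (vals.foldl pvBMStep ((0 : Int), (0 : Int))).1
    let need := max 0 (2 * (vals.count cand : Int) - (bad.length : Int))
    let extra := PySem.List.slice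
        (((PySem.List.enumerate pairs).filter
            (fun p => p.2.1 != p.2.2 && p.2.1 != cand && p.2.2 != cand)).map (fun p => p.1))
        none (some need)
    if (extra.length : Int) < need then -1
    else bad.sum + extra.sum

-- ===== PRECONDITION & SPEC =====
-- Pre_ excludes exactly the inputs where nums2 is shorter than nums1: there Python A
-- raises IndexError (nums2[i] out of range), returning no value.
def Pre_minimumTotalCost (nums1 : List Int) (nums2 : List Int) : Prop :=
  nums1.length ≤ nums2.length
instance (nums1 : List Int) (nums2 : List Int) : Decidable (Pre_minimumTotalCost nums1 nums2) := by
  unfold Pre_minimumTotalCost; infer_instance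

def pvWitness_minimumTotalCost : List Int × List Int := ([1, 1, 2], [1, 2, 2])

def Spec_minimumTotalCost (nums1 : List Int) (nums2 : List Int) (out : Int) : Prop :=
  out = minimumTotalCost_alt nums1 nums2
instance (nums1 : List Int) (nums2 : List Int) (out : Int) : Decidable (Spec_minimumTotalCost nums1 nums2 out) := by
  unfold Spec_minimumTotalCost; infer_instance

-- ===== CLAIM (what is proved, stated in full; the proofs are below) =====
def Claim_equal_minimumTotalCost : Prop := ∀ (nums1 : List Int) (nums2 : List Int), Dom_minimumTotalCost nums1 nums2 → Pre_minimumTotalCost nums1 nums2 → Spec_minimumTotalCost nums1 nums2 (minimumTotalCost nums1 nums2)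

-- ===== LEMMAS AND PROOFS =====

-- the matched ("bad") indices of a given index list, and the corresponding nums1-values (A's view)
def pvMlist (nums1 nums2 : List Int) (l : List Int) : List Int :=
  l.filter (fun i => PySem.List.pyGetD nums1 i 0 == PySem.List.pyGetD nums2 i 0)

def pvVals (nums1 nums2 : List Int) (l : List Int) : List Int :=
  (pvMlist nums1 nums2 l).map (fun i => PySem.List.pyGetD nums1 i 0)

lemma pvFoldA (nums1 nums2 : List Int) :
    ∀ (l : List Int) (l0 : List Int) (d0 : PySem.Dict Int Int),
      l.foldl (fun (acc : List Int × PySem.Dict Int Int) i =>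
        if PySem.List.pyGetD nums1 i 0 = PySem.List.pyGetD nums2 i 0 then
          (acc.1 ++ [i], acc.2.modify (PySem.List.pyGetD nums1 i 0) 0 (· + 1))
        else acc) (l0, d0)
      = (l0 ++ pvMlist nums1 nums2 l,
         (pvVals nums1 nums2 l).foldl (fun d x => d.modify x 0 (· + 1)) d0) := by
  intro l
  induction l with
  | nil => intro l0 d0; simp [pvMlist, pvVals]
  | cons i t ih =>
    intro l0 d0
    by_cases h : PySem.List.pyGetD nums1 i 0 = PySem.List.pyGetD nums2 i 0 <;>
      simp [pvMlist, pvVals, h, List.foldl_cons, ih]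

-- canonical description of "indices of the pairs passing Q, counted from s"
def pvIdxFilt (Q : Int → Int → Bool) : List (Int × Int) → Int → List Int
  | [], _ => []
  | p :: t, s => if Q p.1 p.2 then s :: pvIdxFilt Q t (s + 1) else pvIdxFilt Q t (s + 1)

lemma pvIdxFilt_shift (Q : Int → Int → Bool) :
    ∀ (l : List (Int × Int)) (s t : Int),
      pvIdxFilt Q l (s + t) = (pvIdxFilt Q l t).map (fun x => s + x) := by
  intro l
  induction l with
  | nil => intro s t; simp [pvIdxFilt]
  | cons p r ih =>
    intro s t
    have h1 : s + t + 1 = s + (t + 1) := by ring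
    by_cases h : Q p.1 p.2 <;> simp [pvIdxFilt, h, h1, ih]

lemma pvIdxFilt_length (Q : Int → Int → Bool) :
    ∀ (l : List (Int × Int)) (s : Int),
      (pvIdxFilt Q l s).length = (l.filter (fun p => Q p.1 p.2)).length := by
  intro l
  induction l with
  | nil => intro s; simp [pvIdxFilt]
  | cons p r ih =>
    intro s
    by_cases h : Q p.1 p.2 <;> simp [pvIdxFilt, h, ih]

lemma pvEnumFilt (Q : Int → Int → Bool) :
    ∀ (xs : List (Int × Int)) (s : Int),
      ((PySem.List.enumerate xs s).filter (fun p => Q p.2.1 p.2.2)).map (fun p => p.1)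
      = pvIdxFilt Q xs s := by
  intro xs
  induction xs with
  | nil => intro s; simp [PySem.List.enumerate, pvIdxFilt]
  | cons x t ih =>
    intro s
    rw [PySem.List.enumerate_cons]
    by_cases h : Q x.1 x.2 <;> simp [pvIdxFilt, h, ih]

lemma pvRangeFiltNat (Q : Int → Int → Bool) :
    ∀ (n1 : List Int) (n2 : List Int), n1.length ≤ n2.length →
      ((List.range n1.length).filter (fun k => Q (n1.getD k 0) (n2.getD k 0))).map
          (fun (k : Nat) => (k : Int))
      = pvIdxFilt Q (n1.zip n2) 0 := by
  intro n1
  induction n1 with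
  | nil => intro n2 h; simp [pvIdxFilt]
  | cons x t1 ih =>
    intro n2 h
    cases n2 with
    | nil => simp at h
    | cons y t2 =>
      have h' : t1.length ≤ t2.length := by simpa using h
      have hsh : pvIdxFilt Q (t1.zip t2) 1 = (pvIdxFilt Q (t1.zip t2) 0).map (fun x => x + 1) := by
        simpa [add_comm] using pvIdxFilt_shift Q (t1.zip t2) 1 0
      have IH := ih t2 h'
      have hpred : (fun k => Q ((x :: t1).getD k 0) ((y :: t2).getD k 0)) ∘ Nat.succ
          = fun k => Q (t1.getD k 0) (t2.getD k 0) := by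
        funext k; simp
      have hmap : ∀ (F : List Nat), (F.map Nat.succ).map (fun (k : Nat) => (k : Int))
          = (F.map (fun (k : Nat) => (k : Int))).map (fun x => x + 1) := by
        intro F; simp [List.map_map]
      rw [List.length_cons, List.range_succ_eq_map, List.filter_cons]
      simp only [List.getD_cons_zero]
      rw [List.filter_map, hpred]
      by_cases hq : Q x y
      · simp only [hq, if_true, List.zip_cons_cons, pvIdxFilt, List.map_cons, Nat.cast_zero,
          hmap, IH]
        rw [zero_add, ← hsh]
      · simp only [hq, if_false, List.zip_cons_cons, pvIdxFilt, Bool.false_eq_true,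
          hmap, IH]
        rw [zero_add, ← hsh]

lemma pvRangeValsNat (Q : Int → Int → Bool) :
    ∀ (n1 : List Int) (n2 : List Int), n1.length ≤ n2.length →
      ((List.range n1.length).filter (fun k => Q (n1.getD k 0) (n2.getD k 0))).map
          (fun k => n1.getD k 0)
      = ((n1.zip n2).filter (fun p => Q p.1 p.2)).map (fun p => p.1) := by
  intro n1
  induction n1 with
  | nil => intro n2 h; simp
  | cons x t1 ih =>
    intro n2 h
    cases n2 with
    | nil => simp at h
    | cons y t2 =>
      have h' : t1.length ≤ t2.length := by simpa using h
      have IH := ih t2 h'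
      have hpred : (fun k => Q ((x :: t1).getD k 0) ((y :: t2).getD k 0)) ∘ Nat.succ
          = fun k => Q (t1.getD k 0) (t2.getD k 0) := by
        funext k; simp
      have hmap : ∀ (F : List Nat), (F.map Nat.succ).map (fun k => (x :: t1).getD k 0)
          = F.map (fun k => t1.getD k 0) := by
        intro F; simp [List.map_map, Function.comp_def]
      rw [List.length_cons, List.range_succ_eq_map, List.filter_cons]
      simp only [List.getD_cons_zero]
      rw [List.filter_map, hpred]
      by_cases hq : Q x y
      · simp only [hq, if_true, List.zip_cons_cons, List.filter_cons, List.map_cons,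
          List.getD_cons_zero, hmap, IH]
      · simp only [hq, if_false, List.zip_cons_cons, List.filter_cons, Bool.false_eq_true,
          hmap, IH]

lemma pvRangeFilt (Q : Int → Int → Bool) (n1 n2 : List Int) (h : n1.length ≤ n2.length) :
    (PySem.List.pyRange 0 (n1.length : Int) 1).filter
        (fun i => Q (PySem.List.pyGetD n1 i 0) (PySem.List.pyGetD n2 i 0))
    = pvIdxFilt Q (n1.zip n2) 0 := by
  rw [PySem.List.pyRange_zero_nat, List.filter_map, ← pvRangeFiltNat Q n1 n2 h]
  simp [Function.comp_def]

lemma pvRangeVals (Q : Int → Int → Bool) (n1 n2 : List Int) (h : n1.length ≤ n2.length) :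
    ((PySem.List.pyRange 0 (n1.length : Int) 1).filter
        (fun i => Q (PySem.List.pyGetD n1 i 0) (PySem.List.pyGetD n2 i 0))).map
        (fun i => PySem.List.pyGetD n1 i 0)
    = ((n1.zip n2).filter (fun p => Q p.1 p.2)).map (fun p => p.1) := by
  rw [PySem.List.pyRange_zero_nat, List.filter_map, ← pvRangeValsNat Q n1 n2 h]
  simp [Function.comp_def, List.map_map]

-- A's break-at-need loop is "filter, then take the first need"
lemma pvExtraLoop_take (nums1 nums2 : List Int) (mv need : Int) :
    ∀ (l acc : List Int), (acc.length : Int) < need →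
      pvExtraLoop nums1 nums2 mv need l acc
      = (acc ++ l.filter (fun i =>
          PySem.List.pyGetD nums1 i 0 != PySem.List.pyGetD nums2 i 0 &&
          PySem.List.pyGetD nums1 i 0 != mv && PySem.List.pyGetD nums2 i 0 != mv)).take
          need.toNat := by
  intro l
  induction l with
  | nil =>
    intro acc hacc
    have h1 : acc.length ≤ need.toNat := by omega
    simp [pvExtraLoop, List.take_of_length_le h1]
  | cons i rest ih =>
    intro acc hacc
    rw [List.filter_cons]
    by_cases hc : PySem.List.pyGetD nums1 i 0 ≠ PySem.List.pyGetD nums2 i 0 ∧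
        PySem.List.pyGetD nums1 i 0 ≠ mv ∧ PySem.List.pyGetD nums2 i 0 ≠ mv
    · have hb : (PySem.List.pyGetD nums1 i 0 != PySem.List.pyGetD nums2 i 0 &&
          (PySem.List.pyGetD nums1 i 0 != mv) && (PySem.List.pyGetD nums2 i 0 != mv)) = true := by
        simp [hc.1, hc.2.1, hc.2.2]
      rw [if_pos hb]
      by_cases hif : ((acc ++ [i]).length : Int) = need
      · have hnat : need.toNat = (acc ++ [i]).length := by
          simp at hif ⊢; omega
        have hif' : (acc.length : Int) + 1 = need := by simpa using hif
        rw [List.append_cons, hnat, List.take_left]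
        simp [pvExtraLoop, hc, hif']
      · have hlt : ((acc ++ [i]).length : Int) < need := by
          simp at hif ⊢; omega
        have hif' : ¬ ((acc.length : Int) + 1 = need) := by simpa using hif
        rw [List.append_cons, ← ih (acc ++ [i]) hlt]
        simp [pvExtraLoop, hc, hif']
    · have hb : (PySem.List.pyGetD nums1 i 0 != PySem.List.pyGetD nums2 i 0 &&
          (PySem.List.pyGetD nums1 i 0 != mv) && (PySem.List.pyGetD nums2 i 0 != mv)) = false := by
        push Not at hc
        by_cases h1 : PySem.List.pyGetD nums1 i 0 = PySem.List.pyGetD nums2 i 0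
        · simp [h1]
        · by_cases h2 : PySem.List.pyGetD nums1 i 0 = mv
          · simp [h2]
          · simp [hc h1 h2]
      rw [if_neg (by simp [hb])]
      rw [← ih acc hacc]
      simp [pvExtraLoop, hc]

-- Boyer-Moore potential of value v in state (cand, cnt)
def pvPhi (v : Int) (s : Int × Int) : Int := if v = s.1 then s.2 else -s.2

lemma pvBM_inv : ∀ (vs : List Int) (s : Int × Int), 0 ≤ s.2 →
    0 ≤ (vs.foldl pvBMStep s).2 ∧
    ∀ v : Int, 2 * (vs.count v : Int) + pvPhi v s
      ≤ (vs.length : Int) + pvPhi v (vs.foldl pvBMStep s) := by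
  intro vs
  induction vs with
  | nil => intro s hs; exact ⟨hs, fun v => by simp⟩
  | cons x t ih =>
    intro s hs
    have hstep : 0 ≤ (pvBMStep s x).2 := by
      simp only [pvBMStep]; split_ifs <;> simp <;> omega
    obtain ⟨h1, h2⟩ := ih (pvBMStep s x) hstep
    refine ⟨by simpa using h1, fun v => ?_⟩
    have hrec := h2 v
    have hone : 2 * ((if v = x then 1 else 0 : Int)) + pvPhi v s ≤ 1 + pvPhi v (pvBMStep s x) := by
      simp only [pvPhi, pvBMStep]
      split_ifs <;> simp_all <;> omega
    have hcnt : ((x :: t).count v : Int) = (t.count v : Int) + (if v = x then 1 else 0) := by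
      rw [List.count_cons]
      by_cases hvx : v = x
      · simp [hvx]
      · have hxv : ¬ x = v := fun h => hvx h.symm
        simp [hvx, hxv]
    simp only [List.foldl_cons, List.length_cons]
    push_cast
    rw [hcnt] at *
    omega

lemma pvBM_majority (vs : List Int) (v : Int)
    (h : (vs.length : Int) < 2 * (vs.count v : Int)) :
    v = (vs.foldl pvBMStep ((0 : Int), (0 : Int))).1 := by
  obtain ⟨h1, h2⟩ := pvBM_inv vs (0, 0) le_rfl
  have hv := h2 v
  by_contra hne
  have hphi0 : pvPhi v (0, 0) = 0 := by simp [pvPhi]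
  have hphit : pvPhi v (vs.foldl pvBMStep (0, 0)) = -(vs.foldl pvBMStep (0, 0)).2 := by
    simp [pvPhi, hne]
  omega

lemma pvCount_le_max (vs : List Int) (mv : Int)
    (hmax : PySem.List.max? (PySem.Dict.counter vs).keys
        (fun k => (PySem.Dict.counter vs).getD k 0) = some mv) :
    ∀ v : Int, (vs.count v : Int) ≤ (vs.count mv : Int) := by
  intro v
  by_cases hv : v ∈ vs
  · have hk : v ∈ (PySem.Dict.counter vs).keys := by
      rw [PySem.Dict.keys_counter]
      exact (PySem.Set.mem_ofList _ _).mpr hv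
    have := PySem.List.max?_isMax hmax v hk
    simpa [PySem.Dict.getD_counter] using this
  · have : vs.count v = 0 := List.count_eq_zero.mpr hv
    rw [this]
    exact_mod_cast Nat.zero_le _

-- ===== VERDICT (by name: the statement is the Claim_ definition above) =====
theorem minimumTotalCost_spec : Claim_equal_minimumTotalCost := by
  intro nums1 nums2 _hdom hpre
  unfold Spec_minimumTotalCost
  simp only [minimumTotalCost, minimumTotalCost_alt]
  rw [pvFoldA]
  simp only [List.nil_append]
  have hbadA : pvMlist nums1 nums2 (PySem.List.pyRange 0 (nums1.length : Int) 1)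
      = ((PySem.List.enumerate (nums1.zip nums2)).filter (fun p => p.2.1 == p.2.2)).map
          (fun p => p.1) := by
    unfold pvMlist
    rw [pvRangeFilt (fun a b => a == b) nums1 nums2 hpre, ← pvEnumFilt]
  have hvalsA : pvVals nums1 nums2 (PySem.List.pyRange 0 (nums1.length : Int) 1)
      = ((nums1.zip nums2).filter (fun p => p.1 == p.2)).map (fun p => p.1) := by
    unfold pvVals pvMlist
    rw [pvRangeVals (fun a b => a == b) nums1 nums2 hpre]
  rw [hbadA, hvalsA, ← PySem.Dict.counter_eq_foldl]
  set zl := nums1.zip nums2 with hzl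
  set bad := ((PySem.List.enumerate zl).filter (fun p => p.2.1 == p.2.2)).map (fun p => p.1)
    with hbaddef
  set vs := (zl.filter (fun p => p.1 == p.2)).map (fun p => p.1) with hvsdef
  by_cases hb : bad = []
  · simp [hb]
  · simp only [hb, reduceIte]
    have hlenvb : vs.length = bad.length := by
      rw [hbaddef, pvEnumFilt, pvIdxFilt_length]
      simp [hvsdef]
    have hvs_ne : vs ≠ [] := by
      intro hnil
      apply hb
      have h0 : bad.length = 0 := by rw [← hlenvb, hnil]; rfl
      exact List.length_eq_zero_iff.mp h0
    rcases hmx : PySem.List.max? (PySem.Dict.counter vs).keys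
        (fun k => (PySem.Dict.counter vs).getD k 0) with _ | mv
    · exfalso
      rw [PySem.List.max?_eq_none_iff] at hmx
      rw [PySem.Dict.keys_counter] at hmx
      rcases hv : vs with _ | ⟨v, t⟩
      · exact hvs_ne hv
      · have hmem : v ∈ PySem.Set.ofList (v :: t) :=
          (PySem.Set.mem_ofList _ _).mpr (by simp)
        rw [← hv, hmx] at hmem
        simp at hmem
    · have hMcnt : (PySem.Dict.counter vs).getD mv 0 = (vs.count mv : Int) :=
        PySem.Dict.getD_counter vs mv
      simp only [hMcnt]
      by_cases hmaj : (vs.length : Int) < 2 * (vs.count mv : Int)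
      · -- strict majority: Boyer-Moore finds exactly A's argmax value
        have hceq : mv = (vs.foldl pvBMStep ((0 : Int), (0 : Int))).1 :=
          pvBM_majority vs mv hmaj
        rw [← hceq]
        have hneed : max 0 (2 * (vs.count mv : Int) - (bad.length : Int))
            = 2 * (vs.count mv : Int) - (bad.length : Int) := by
          rw [← hlenvb]; omega
        have hpos : 0 < max 0 (2 * (vs.count mv : Int) - (bad.length : Int)) := by
          rw [← hlenvb]; omega
        rw [pvExtraLoop_take nums1 nums2 mv _ _ [] (by simpa using hpos)]
        rw [List.nil_append,
          pvRangeFilt (fun a b => a != b && a != mv && b != mv) nums1 nums2 hpre,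
          ← pvEnumFilt, ← hzl]
        rw [PySem.List.slice_to _ (le_of_lt hpos)]
        rw [if_pos (by omega : max 0 (2 * (vs.count mv : Int) - (bad.length : Int)) ≠ 0)]
      · -- no strict majority: both needs are 0 and both sides return sum(bad)
        have hle := pvCount_le_max vs mv hmx (vs.foldl pvBMStep ((0 : Int), (0 : Int))).1
        have hneedA : max 0 (2 * (vs.count mv : Int) - (bad.length : Int)) = 0 := by
          rw [← hlenvb]; omega
        have hneedB : max 0 (2 * (vs.count (vs.foldl pvBMStep ((0 : Int), (0 : Int))).1 : Int)
            - (bad.length : Int)) = 0 := by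
          rw [← hlenvb]; omega
        rw [hneedA, hneedB]
        rw [PySem.List.slice_to _ (le_refl (0 : Int))]
        simp
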